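-- pv_equiv track=rewrite | github.com/WuYudaPKU/CS101_PekingUniversity | part_1/Doremy's City Construction.py | MinEdges
-- ===== SOURCE A (Python) =====
-- def MinEdges(lst,n):
--     if len(set(lst))==1:
--         return len(lst)//2
--     if len(lst)==1:
--         return 0
--     if len(lst)==2:
--         return 1
--     lst.sort()
--     a=lst[n//2]         #what the fuck!
--     lst_big=[]
--     lst_small=[]
--     lst_=[]
--     for i in lst:
--         if i >a:
--             lst_big.append(i)
--         elif i<a:
--             lst_small.append(i)
--         else:
--             lst_.append(i)
--     result=len(lst_big)*len(lst_small)
--     result+=max(len(lst_big),len(lst_small))*len(lst_)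
--     return result
-- ===== SOURCE B (Python) =====
-- def _bisect_left(s, a):
--     lo, hi = 0, len(s)
--     while lo < hi:
--         m = (lo + hi) // 2
--         if s[m] < a:
--             lo = m + 1
--         else:
--             hi = m
--     return lo
--
-- def _bisect_right(s, a):
--     lo, hi = 0, len(s)
--     while lo < hi:
--         m = (lo + hi) // 2
--         if a < s[m]:
--             hi = m
--         else:
--             lo = m + 1
--     return lo
--
-- def MinEdges(lst, n):
--     s = sorted(lst)
--     if s[0] == s[-1]:
--         return len(s) // 2
--     if len(s) == 2:
--         return 1
--     a = s[n // 2]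
--     small = _bisect_left(s, a)
--     eq_end = _bisect_right(s, a)
--     big = len(s) - eq_end
--     equal = eq_end - small
--     return small * big + max(small, big) * equal
-- ===== Notes on version B (the rewrite author's own statement) =====
-- stated objective: alternative
-- what changed: Replaces A's set-based uniformity test and linear three-way partition loop after the sort by a first/last comparison on the sorted list and two hand-written binary searches locating the pivot block's boundaries, from which the three class sizes are derived arithmetically; Pre_ excludes only inputs where A raises IndexError (empty list, or pivot index n//2 out of range). B does not mutate lst (A sorts it in place); the equivalence is about the return value.
import Mathlib
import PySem

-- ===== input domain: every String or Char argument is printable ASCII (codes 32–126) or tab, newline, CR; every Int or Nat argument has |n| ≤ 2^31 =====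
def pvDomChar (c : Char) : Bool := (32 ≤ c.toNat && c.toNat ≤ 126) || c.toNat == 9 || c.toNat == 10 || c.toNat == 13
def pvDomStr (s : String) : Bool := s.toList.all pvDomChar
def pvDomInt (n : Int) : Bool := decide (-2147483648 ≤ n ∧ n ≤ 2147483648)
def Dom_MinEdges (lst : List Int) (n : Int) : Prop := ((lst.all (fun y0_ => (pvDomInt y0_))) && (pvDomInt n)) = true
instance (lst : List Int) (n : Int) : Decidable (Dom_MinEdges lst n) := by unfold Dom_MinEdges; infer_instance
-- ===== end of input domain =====

-- B replaces A's set-based uniformity test and linear three-way partition loop by a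
-- first/last comparison on the sorted list plus two hand-written binary searches for the
-- pivot block's boundaries (objective: alternative). A sorts lst IN PLACE (lst.sort());
-- B does not mutate its argument — the equivalence proved here is about the RETURN value only.

-- ===== PORT A =====
def MinEdges (lst : List Int) (n : Int) : Int :=
  if (PySem.Set.ofList lst).length = 1 then
    PySem.Int.floordiv (lst.length : Int) 2
  else if lst.length = 1 then 0
  else if lst.length = 2 then 1
  else
    let s := PySem.List.sorted lst (fun x => x)
    match PySem.List.pyGet? s (PySem.Int.floordiv n 2) with
    | none => 0   -- IndexError in Python; excluded by Pre_MinEdges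
    | some a =>
      let p := s.foldl (fun (acc : List Int × List Int × List Int) i =>
        if a < i then (acc.1 ++ [i], acc.2.1, acc.2.2)
        else if i < a then (acc.1, acc.2.1 ++ [i], acc.2.2)
        else (acc.1, acc.2.1, acc.2.2 ++ [i])) ([], [], [])
      (p.1.length : Int) * (p.2.1.length : Int)
        + max (p.1.length : Int) (p.2.1.length : Int) * (p.2.2.length : Int)

-- ===== PORT B =====
-- Source B's `_bisect_left` while-loop (indices m always satisfy lo ≤ m < hi ≤ len, so s[m] is getD)
def pvBL (s : List Int) (a : Int) (lo hi : Nat) : Nat :=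
  if lo < hi then
    let m := (lo + hi) / 2
    if s.getD m 0 < a then pvBL s a (m + 1) hi else pvBL s a lo m
  else lo
termination_by hi - lo
decreasing_by all_goals omega

-- Source B's `_bisect_right` while-loop
def pvBR (s : List Int) (a : Int) (lo hi : Nat) : Nat :=
  if lo < hi then
    let m := (lo + hi) / 2
    if a < s.getD m 0 then pvBR s a lo m else pvBR s a (m + 1) hi
  else lo
termination_by hi - lo
decreasing_by all_goals omega

def MinEdges_alt (lst : List Int) (n : Int) : Int :=
  let s := PySem.List.sorted lst (fun x => x)
  match PySem.List.pyGet? s 0, PySem.List.pyGet? s (-1) with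
  | some f, some l =>
    if f == l then PySem.Int.floordiv (s.length : Int) 2
    else if s.length = 2 then 1
    else
      match PySem.List.pyGet? s (PySem.Int.floordiv n 2) with
      | none => 0   -- IndexError in Python; excluded by Pre_MinEdges
      | some a =>
        let small := pvBL s a 0 s.length
        let eqEnd := pvBR s a 0 s.length
        let big := s.length - eqEnd
        let equal := eqEnd - small
        (small : Int) * (big : Int) + max (small : Int) (big : Int) * (equal : Int)
  | _, _ => 0     -- s[0] IndexError on the empty list; excluded by Pre_MinEdges

-- ===== PRECONDITION & SPEC =====
-- Pre_ excludes exactly the inputs where Python A raises IndexError at lst[n//2]: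
-- the empty list, and lists of length ≥ 3 with ≥ 2 distinct values whose index n//2
-- is out of range. On every other input A returns normally and Pre_ admits it.
def Pre_MinEdges (lst : List Int) (n : Int) : Prop :=
  lst ≠ [] ∧ ((PySem.Set.ofList lst).length = 1 ∨ lst.length ≤ 2 ∨
    PySem.Raise.InRange lst.length (PySem.Int.floordiv n 2))
instance (lst : List Int) (n : Int) : Decidable (Pre_MinEdges lst n) := by
  unfold Pre_MinEdges; infer_instance

def pvWitness_MinEdges : List Int × Int := ([3, 1, 2, 2, 5], 5)

def Spec_MinEdges (lst : List Int) (n : Int) (out : Int) : Prop := out = MinEdges_alt lst n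
instance (lst : List Int) (n : Int) (out : Int) : Decidable (Spec_MinEdges lst n out) := by
  unfold Spec_MinEdges; infer_instance

-- ===== CLAIM (what is proved, stated in full; the proofs are below) =====
def Claim_equal_MinEdges : Prop := ∀ (lst : List Int) (n : Int), Dom_MinEdges lst n → Pre_MinEdges lst n → Spec_MinEdges lst n (MinEdges lst n)

-- ===== LEMMAS AND PROOFS =====

-- a nonempty list has a one-element set of distinct values iff all its elements equal its head
theorem pv_set_len_one {lst : List Int} (h : lst ≠ []) :
    (PySem.Set.ofList lst).length = 1 ↔ ∀ x ∈ lst, x = lst.headD 0 := by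
  rw [← PySem.List.dedup_eq_ofList]
  constructor
  · intro h1 x hx
    obtain ⟨y, hy⟩ := List.length_eq_one_iff.mp h1
    have hxl : x ∈ PySem.List.dedup lst := (PySem.List.mem_dedup lst x).mpr hx
    have hh : lst.headD 0 ∈ PySem.List.dedup lst :=
      (PySem.List.mem_dedup lst _).mpr (by cases lst with
        | nil => exact absurd rfl h
        | cons z t => simp)
    rw [hy] at hxl hh
    simp at hxl hh
    rw [List.headD_eq_head?_getD, hh, hxl]
  · intro hall
    have hnd := PySem.List.nodup_dedup lst
    have hmem : ∀ x ∈ PySem.List.dedup lst, x = lst.headD 0 := fun x hx =>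
      hall x ((PySem.List.mem_dedup lst x).mp hx)
    have hne : lst.headD 0 ∈ PySem.List.dedup lst :=
      (PySem.List.mem_dedup lst _).mpr (by cases lst with
        | nil => exact absurd rfl h
        | cons z t => simp)
    match hd : PySem.List.dedup lst with
    | [] => rw [hd] at hne; simp at hne
    | [y] => simp
    | y :: z :: t =>
      rw [hd] at hnd hmem
      have hy := hmem y (by simp)
      have hz := hmem z (by simp)
      simp [hy, hz] at hnd

-- the three-way partition fold of A computes the three filters
theorem pv_fold3 (a : Int) (s : List Int) :
    s.foldl (fun (acc : List Int × List Int × List Int) i =>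
        if a < i then (acc.1 ++ [i], acc.2.1, acc.2.2)
        else if i < a then (acc.1, acc.2.1 ++ [i], acc.2.2)
        else (acc.1, acc.2.1, acc.2.2 ++ [i])) ([], [], [])
      = (s.filter (fun i => a < i), s.filter (fun i => i < a),
         s.filter (fun i => !(a < i) && !(i < a))) := by
  suffices h : ∀ (A B C : List Int),
      s.foldl (fun (acc : List Int × List Int × List Int) i =>
        if a < i then (acc.1 ++ [i], acc.2.1, acc.2.2)
        else if i < a then (acc.1, acc.2.1 ++ [i], acc.2.2)
        else (acc.1, acc.2.1, acc.2.2 ++ [i])) (A, B, C)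
      = (A ++ s.filter (fun i => a < i), B ++ s.filter (fun i => i < a),
         C ++ s.filter (fun i => !(a < i) && !(i < a))) by
    simpa using h [] [] []
  induction s with
  | nil => simp
  | cons x t ih =>
    intro A B C
    by_cases h1 : a < x
    · simp [h1, ih, List.append_assoc, not_lt.mpr (le_of_lt h1)]
    · by_cases h2 : x < a
      · simp [h1, h2, ih, List.append_assoc]
      · simp [h1, h2, ih, List.append_assoc]

-- a threshold position determines countP on any list
theorem pv_countP_threshold (p : Int → Bool) : ∀ (s : List Int) (r : Nat), r ≤ s.length →
    (∀ i (h : i < s.length), p s[i] = true ↔ i < r) → s.countP p = r := by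
  intro s
  induction s with
  | nil => intro r h1 _; simp only [List.length_nil] at h1; simp; omega
  | cons x t ih =>
    intro r h1 h2
    match r with
    | 0 =>
      have hx : p x = false := by
        have := (h2 0 (by simp)).not
        simpa using this
      rw [List.countP_cons, hx]
      have ht : t.countP p = 0 := ih 0 (by omega) (fun i hi => by
        have := h2 (i + 1) (by simpa using Nat.succ_lt_succ hi)
        simpa using this)
      simp [ht]
    | r' + 1 =>
      have hx : p x = true := (h2 0 (by simp)).mpr (by omega)
      rw [List.countP_cons, hx]
      have ht : t.countP p = r' := ih r' (Nat.le_of_succ_le_succ (by simpa using h1))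
        (fun i hi => by
          have := h2 (i + 1) (by simpa using Nat.succ_lt_succ hi)
          simp only [List.getElem_cons_succ] at this
          rw [this]; omega)
      simp [ht]

-- pvBL finds the lower boundary of the pivot block in a sorted list
theorem pv_bl_spec (s : List Int) (a : Int)
    (hs : List.Pairwise (fun x y : Int => x ≤ y) s) :
    ∀ (N lo hi : Nat), hi - lo ≤ N → lo ≤ hi → hi ≤ s.length →
    (∀ i, i < lo → s.getD i 0 < a) →
    (∀ i, hi ≤ i → i < s.length → ¬ s.getD i 0 < a) →
    lo ≤ pvBL s a lo hi ∧ pvBL s a lo hi ≤ hi ∧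
      (∀ i, i < pvBL s a lo hi → s.getD i 0 < a) ∧
      (∀ i, pvBL s a lo hi ≤ i → i < s.length → ¬ s.getD i 0 < a) := by
  have hsort : ∀ i j, i ≤ j → j < s.length → s.getD i 0 ≤ s.getD j 0 := by
    intro i j hij hj
    rcases Nat.eq_or_lt_of_le hij with h | h
    · subst h; exact le_rfl
    · rw [List.getD_eq_getElem _ _ (by omega), List.getD_eq_getElem _ _ hj]
      exact List.pairwise_iff_getElem.mp hs i j (by omega) hj h
  intro N
  induction N with
  | zero =>
    intro lo hi hN hlh _ hbelow habove
    rw [pvBL, if_neg (by omega)]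
    exact ⟨le_rfl, by omega, fun i hi => hbelow i hi, fun i h1 h2 => habove i (by omega) h2⟩
  | succ N ihN =>
    intro lo hi hN hlh hhlen hbelow habove
    by_cases hlt : lo < hi
    · rw [pvBL, if_pos hlt]
      simp only []
      by_cases hc : s.getD ((lo + hi) / 2) 0 < a
      · rw [if_pos hc]
        have res := ihN ((lo + hi) / 2 + 1) hi (by omega) (by omega) hhlen
          (fun i hilt => by
            have := hsort i ((lo + hi) / 2) (by omega) (by omega); omega)
          habove
        exact ⟨by omega, res.2.1, res.2.2⟩
      · rw [if_neg hc]
        have res := ihN lo ((lo + hi) / 2) (by omega) (by omega) (by omega) hbelow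
          (fun i hige hilen => by
            have := hsort ((lo + hi) / 2) i hige hilen; omega)
        exact ⟨res.1, by omega, res.2.2.1, res.2.2.2⟩
    · rw [pvBL, if_neg hlt]
      exact ⟨le_rfl, by omega, fun i hi => hbelow i hi, fun i h1 h2 => habove i (by omega) h2⟩

-- pvBR finds the upper boundary of the pivot block in a sorted list
theorem pv_br_spec (s : List Int) (a : Int)
    (hs : List.Pairwise (fun x y : Int => x ≤ y) s) :
    ∀ (N lo hi : Nat), hi - lo ≤ N → lo ≤ hi → hi ≤ s.length →
    (∀ i, i < lo → ¬ a < s.getD i 0) →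
    (∀ i, hi ≤ i → i < s.length → a < s.getD i 0) →
    lo ≤ pvBR s a lo hi ∧ pvBR s a lo hi ≤ hi ∧
      (∀ i, i < pvBR s a lo hi → ¬ a < s.getD i 0) ∧
      (∀ i, pvBR s a lo hi ≤ i → i < s.length → a < s.getD i 0) := by
  have hsort : ∀ i j, i ≤ j → j < s.length → s.getD i 0 ≤ s.getD j 0 := by
    intro i j hij hj
    rcases Nat.eq_or_lt_of_le hij with h | h
    · subst h; exact le_rfl
    · rw [List.getD_eq_getElem _ _ (by omega), List.getD_eq_getElem _ _ hj]
      exact List.pairwise_iff_getElem.mp hs i j (by omega) hj h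
  intro N
  induction N with
  | zero =>
    intro lo hi hN hlh _ hbelow habove
    rw [pvBR, if_neg (by omega)]
    exact ⟨le_rfl, by omega, fun i hi => hbelow i hi, fun i h1 h2 => habove i (by omega) h2⟩
  | succ N ihN =>
    intro lo hi hN hlh hhlen hbelow habove
    by_cases hlt : lo < hi
    · rw [pvBR, if_pos hlt]
      simp only []
      by_cases hc : a < s.getD ((lo + hi) / 2) 0
      · rw [if_pos hc]
        have res := ihN lo ((lo + hi) / 2) (by omega) (by omega) (by omega) hbelow
          (fun i hige hilen => by
            have := hsort ((lo + hi) / 2) i hige hilen; omega)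
        exact ⟨res.1, by omega, res.2.2.1, res.2.2.2⟩
      · rw [if_neg hc]
        have res := ihN ((lo + hi) / 2 + 1) hi (by omega) (by omega) hhlen
          (fun i hilt => by
            have := hsort i ((lo + hi) / 2) (by omega) (by omega); omega)
          habove
        exact ⟨by omega, res.2.1, res.2.2⟩
    · rw [pvBR, if_neg hlt]
      exact ⟨le_rfl, by omega, fun i hi => hbelow i hi, fun i h1 h2 => habove i (by omega) h2⟩

-- ¬ a < x splits into x < a and the middle (equal) class
theorem pv_count_le_split (a : Int) (s : List Int) :
    s.countP (fun x => !decide (a < x))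
      = s.countP (fun x => decide (x < a))
        + s.countP (fun i => !decide (a < i) && !decide (i < a)) := by
  induction s with
  | nil => simp
  | cons x t ih =>
    simp only [List.countP_cons]
    rcases lt_trichotomy x a with h | h | h
    · simp [h, not_lt.mpr h.le, ih]; omega
    · subst h; simp [ih]; omega
    · simp [h, not_lt.mpr h.le, ih]

-- ===== VERDICT (by name: the statement is the Claim_ definition above) =====
theorem MinEdges_spec : Claim_equal_MinEdges := by
  intro lst n _ hpre
  obtain ⟨hne, hdisj⟩ := hpre
  unfold Spec_MinEdges MinEdges MinEdges_alt
  dsimp only []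
  set s := PySem.List.sorted lst (fun x => x) with hsdef
  have hslen : s.length = lst.length := PySem.List.length_sorted lst _ _
  have hlen0 : lst.length ≠ 0 := by simpa using hne
  have hpair : List.Pairwise (fun x y : Int => x ≤ y) s :=
    PySem.List.sorted_pairwise lst (fun x => x)
  have hsort : ∀ i j, i ≤ j → j < s.length → s.getD i 0 ≤ s.getD j 0 := by
    intro i j hij hj
    rcases Nat.eq_or_lt_of_le hij with h | h
    · subst h; exact le_rfl
    · rw [List.getD_eq_getElem _ _ (by omega), List.getD_eq_getElem _ _ hj]
      exact List.pairwise_iff_getElem.mp hpair i j (by omega) hj h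
  have hmem_getD : ∀ i, i < s.length → s.getD i 0 ∈ lst := by
    intro i hi
    rw [List.getD_eq_getElem _ _ hi]
    exact (PySem.List.mem_sorted _ _ _ _).mp (List.getElem_mem hi)
  have hf : PySem.List.pyGet? s 0 = some (s.getD 0 0) := by
    rw [PySem.List.pyGet?_zero, List.getD_eq_getElem _ _ (by omega),
      List.getElem?_eq_getElem (by omega)]
  have hl : PySem.List.pyGet? s (-1) = some (s.getD (s.length - 1) 0) := by
    rw [PySem.List.pyGet?_neg_one, List.getLast?_eq_getElem?,
      List.getD_eq_getElem _ _ (by omega), List.getElem?_eq_getElem (by omega)]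
  rw [hf, hl]
  dsimp only []
  by_cases hall : ∀ x ∈ lst, x = lst.headD 0
  · rw [if_pos ((pv_set_len_one hne).mpr hall)]
    have : (s.getD 0 0 == s.getD (s.length - 1) 0) = true := by
      simp only [beq_iff_eq]
      rw [hall _ (hmem_getD 0 (by omega)), hall _ (hmem_getD (s.length - 1) (by omega))]
    rw [if_pos this, hslen]
  · have hflne : ¬ (s.getD 0 0 == s.getD (s.length - 1) 0) = true := by
      intro hc
      simp only [beq_iff_eq] at hc
      apply hall
      have hx0 : ∀ x ∈ lst, x = s.getD 0 0 := by
        intro x hx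
        have hxs : x ∈ s := (PySem.List.mem_sorted _ _ _ _).mpr hx
        obtain ⟨i, hi, hgi⟩ := List.mem_iff_getElem.mp hxs
        have h1 := hsort 0 i (by omega) hi
        have h2 := hsort i (s.length - 1) (by omega) (by omega)
        rw [List.getD_eq_getElem _ _ hi, hgi] at h1 h2
        omega
      intro x hx
      rw [hx0 x hx, ← hx0 (lst.headD 0) (by
        cases lst with
        | nil => exact absurd rfl hne
        | cons z t => simp)]
    have h1 : ¬ (PySem.Set.ofList lst).length = 1 :=
      fun hc => hall ((pv_set_len_one hne).mp hc)
    have hlen1 : lst.length ≠ 1 := by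
      intro hc
      obtain ⟨y, hy⟩ := List.length_eq_one_iff.mp hc
      exact hall (by intro x hx; rw [hy] at hx ⊢; simpa using hx)
    rw [if_neg h1, if_neg hlen1, if_neg hflne]
    by_cases hlen2 : lst.length = 2
    · rw [if_pos hlen2, if_pos (by omega)]
    · rw [if_neg hlen2, if_neg (by omega)]
      have hinr : PySem.Raise.InRange lst.length (PySem.Int.floordiv n 2) := by
        rcases hdisj with hc | hc | hc
        · exact absurd hc h1
        · omega
        · exact hc
      match ha : PySem.List.pyGet? s (PySem.Int.floordiv n 2) with
      | none =>
        exact absurd hinr (by rw [PySem.List.pyGet?_eq_none_iff, hslen] at ha; exact ha)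
      | some a =>
        simp only []
        rw [pv_fold3]
        simp only [← List.countP_eq_length_filter]
        have hbl := pv_bl_spec s a hpair s.length 0 s.length (by omega) (by omega)
          (by omega) (by omega) (fun i h1 h2 => by omega)
        have hbr := pv_br_spec s a hpair s.length 0 s.length (by omega) (by omega)
          (by omega) (fun i h1 => by omega) (fun i h1 h2 => by omega)
        set small := pvBL s a 0 s.length with hsm
        set eqEnd := pvBR s a 0 s.length with hee
        have hcsm : s.countP (fun x => decide (x < a)) = small := by
          apply pv_countP_threshold _ s small hbl.2.1
          intro i hi
          rw [← List.getD_eq_getElem s 0 hi]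
          simp only [decide_eq_true_eq]
          constructor
          · intro hp
            by_contra hc
            exact hbl.2.2.2 i (by omega) hi hp
          · intro hp
            exact hbl.2.2.1 i hp
        have hcee : s.countP (fun x => !decide (a < x)) = eqEnd := by
          apply pv_countP_threshold _ s eqEnd hbr.2.1
          intro i hi
          rw [← List.getD_eq_getElem s 0 hi]
          simp only [Bool.not_eq_true', decide_eq_false_iff_not]
          constructor
          · intro hp
            by_contra hc
            exact hp (hbr.2.2.2 i (by omega) hi)
          · intro hp
            exact hbr.2.2.1 i hp
        have hsplit := pv_count_le_split a s
        have htot : s.length = s.countP (fun i => decide (a < i))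
            + s.countP (fun x => !decide (a < x)) := by
          have h := List.length_eq_countP_add_countP (p := fun i => decide (a < i)) (l := s)
          rw [h]
          congr 1
          exact List.countP_congr (fun x _ => by simp)
        rw [hcsm, hcee] at hsplit
        rw [hcee] at htot
        have hmid : s.countP (fun i => !decide (a < i) && !decide (i < a))
            = eqEnd - small := by omega
        have hbig : s.countP (fun i => decide (a < i)) = s.length - eqEnd := by omega
        rw [hcsm, hmid, hbig]
        have h1' : eqEnd ≤ s.length := by omega
        have h2' : small ≤ eqEnd := by omega
        push_cast [Nat.cast_sub h1', Nat.cast_sub h2']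
        ring_nf
        rw [max_comm, mul_comm]
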